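-- pv_equiv track=rewrite | github.com/amasuba/ABVT3R | classes/reconstruction.py | _check_manifold_property
-- ===== SOURCE A (Python) =====
-- def _check_manifold_property(triangles):
--     """
--     Check if mesh is a proper manifold (each edge shared by at most 2 triangles)
--     """
--     edge_count = {}
--
--     for triangle in triangles:
--         edges = [
--             tuple(sorted([triangle[0], triangle[1]])),
--             tuple(sorted([triangle[1], triangle[2]])),
--             tuple(sorted([triangle[2], triangle[0]]))
--         ]
--
--         for edge in edges:
--             edge_count[edge] = edge_count.get(edge, 0) + 1
--
--     # Check if any edge is shared by more than 2 triangles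
--     non_manifold_edges = sum(1 for count in edge_count.values() if count > 2)
--
--     return non_manifold_edges == 0
-- ===== SOURCE B (Python) =====
-- def _check_manifold_property(triangles):
--     """
--     Check if mesh is a proper manifold (each edge shared by at most 2 triangles)
--     """
--     seen_once = set()
--     seen_twice = set()
--
--     for triangle in triangles:
--         a, b, c = triangle[0], triangle[1], triangle[2]
--         for edge in ((min(a, b), max(a, b)),
--                      (min(b, c), max(b, c)),
--                      (min(c, a), max(c, a))):
--             if edge in seen_twice:
--                 # third occurrence of this edge: non-manifold
--                 return False
--             if edge in seen_once:
--                 seen_once.remove(edge)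
--                 seen_twice.add(edge)
--             else:
--                 seen_once.add(edge)
--
--     return True
-- ===== Notes on version B (the rewrite author's own statement) =====
-- stated objective: simpler
-- what changed: Replaces the integer-count dictionary plus a separate final scan over its values with two membership sets (seen once / seen twice) maintained in one pass, returning False immediately on an edge's third occurrence.
import Mathlib
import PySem

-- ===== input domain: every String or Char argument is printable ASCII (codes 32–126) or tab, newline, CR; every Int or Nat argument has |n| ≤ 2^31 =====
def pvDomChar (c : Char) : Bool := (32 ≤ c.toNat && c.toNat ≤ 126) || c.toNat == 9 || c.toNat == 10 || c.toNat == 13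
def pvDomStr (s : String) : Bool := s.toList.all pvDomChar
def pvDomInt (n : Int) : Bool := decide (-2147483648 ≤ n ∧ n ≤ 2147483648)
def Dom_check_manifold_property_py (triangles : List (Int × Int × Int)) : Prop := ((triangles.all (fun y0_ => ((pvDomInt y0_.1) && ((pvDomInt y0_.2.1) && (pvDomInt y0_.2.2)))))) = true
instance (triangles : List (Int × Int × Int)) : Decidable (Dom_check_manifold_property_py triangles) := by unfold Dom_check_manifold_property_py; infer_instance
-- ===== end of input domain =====

-- B replaces A's edge-count dictionary (plus a final scan of its values) with two membership
-- sets, seen-once / seen-twice, maintained in one pass with an early exit: simpler bookkeeping.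


-- ===== PORT A =====
-- tuple(sorted([x, y])) on two ints: exact (Python's sorted of a 2-list)
def pvSorted2 (x y : Int) : Int × Int := if x ≤ y then (x, y) else (y, x)

def check_manifold_property_py (triangles : List (Int × Int × Int)) : Bool :=
  let edge_count : PySem.Dict (Int × Int) Int :=
    triangles.foldl (fun d t =>
      let edges := [pvSorted2 t.1 t.2.1, pvSorted2 t.2.1 t.2.2, pvSorted2 t.2.2 t.1]
      edges.foldl (fun d e => d.insert e (d.getD e 0 + 1)) d) PySem.Dict.empty
  let non_manifold_edges : Int :=
    edge_count.values.foldl (fun acc c => if 2 < c then acc + 1 else acc) 0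
  non_manifold_edges == 0

-- ===== PORT B =====
-- (min x y, max x y)
def pvMinMax (x y : Int) : Int × Int := (min x y, max x y)

-- body of B's inner loop: none = 'return False' (seen_once.remove on a present element = discard)
def pvStep (once twice : PySem.Set (Int × Int)) (e : Int × Int) :
    Option (PySem.Set (Int × Int) × PySem.Set (Int × Int)) :=
  if PySem.Set.contains twice e then none
  else if PySem.Set.contains once e then some (PySem.Set.discard once e, PySem.Set.add twice e)
  else some (PySem.Set.add once e, twice)

-- B's inner 'for edge in (…)' loop
def pvEdgeLoop : List (Int × Int) → PySem.Set (Int × Int) → PySem.Set (Int × Int) →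
    Option (PySem.Set (Int × Int) × PySem.Set (Int × Int))
  | [], once, twice => some (once, twice)
  | e :: es, once, twice =>
    match pvStep once twice e with
    | none => none
    | some (o, t) => pvEdgeLoop es o t

-- B's outer 'for triangle in triangles' loop
def pvTriLoop : List (Int × Int × Int) → PySem.Set (Int × Int) → PySem.Set (Int × Int) → Bool
  | [], _, _ => true
  | t :: ts, once, twice =>
    match pvEdgeLoop [pvMinMax t.1 t.2.1, pvMinMax t.2.1 t.2.2, pvMinMax t.2.2 t.1] once twice with
    | none => false
    | some (o, tw) => pvTriLoop ts o tw

def check_manifold_property_py_alt (triangles : List (Int × Int × Int)) : Bool :=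
  pvTriLoop triangles PySem.Set.empty PySem.Set.empty

-- ===== PRECONDITION & SPEC =====
def Spec_check_manifold_property_py (triangles : List (Int × Int × Int)) (out : Bool) : Prop := out = check_manifold_property_py_alt triangles
instance (triangles : List (Int × Int × Int)) (out : Bool) : Decidable (Spec_check_manifold_property_py triangles out) := by unfold Spec_check_manifold_property_py; infer_instance

-- ===== CLAIM (what is proved, stated in full; the proofs are below) =====
def Claim_equal_check_manifold_property_py : Prop := ∀ (triangles : List (Int × Int × Int)), Dom_check_manifold_property_py triangles → Spec_check_manifold_property_py triangles (check_manifold_property_py triangles)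

-- ===== LEMMAS AND PROOFS =====

def pvEdges (t : Int × Int × Int) : List (Int × Int) :=
  [pvSorted2 t.1 t.2.1, pvSorted2 t.2.1 t.2.2, pvSorted2 t.2.2 t.1]

-- B's loop flattened to a single run over the edge stream
def pvRun : List (Int × Int) → PySem.Set (Int × Int) → PySem.Set (Int × Int) → Bool
  | [], _, _ => true
  | e :: es, once, twice =>
    match pvStep once twice e with
    | none => false
    | some (o, t) => pvRun es o t

theorem pvMinMax_eq (x y : Int) : pvMinMax x y = pvSorted2 x y := by
  unfold pvMinMax pvSorted2
  simp only [min_def, max_def]; split <;> rfl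

theorem pvRun_append (es rest : List (Int × Int)) (once twice : PySem.Set (Int × Int)) :
    pvRun (es ++ rest) once twice =
      match pvEdgeLoop es once twice with
      | none => false
      | some (o, t) => pvRun rest o t := by
  induction es generalizing once twice with
  | nil => rfl
  | cons e es ih =>
    simp only [List.cons_append, pvRun, pvEdgeLoop]
    cases pvStep once twice e with
    | none => rfl
    | some st => exact ih st.1 st.2

theorem pvTriLoop_eq_pvRun (ts : List (Int × Int × Int)) (once twice : PySem.Set (Int × Int)) :
    pvTriLoop ts once twice = pvRun (ts.flatMap pvEdges) once twice := by
  induction ts generalizing once twice with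
  | nil => rfl
  | cons t ts ih =>
    have hun : pvTriLoop (t :: ts) once twice =
        (match pvEdgeLoop (pvEdges t) once twice with
         | none => false
         | some (o, tw) => pvTriLoop ts o tw) := by
      simp only [pvTriLoop, pvMinMax_eq]; rfl
    rw [hun, List.flatMap_cons, pvRun_append]
    cases pvEdgeLoop (pvEdges t) once twice with
    | none => rfl
    | some st => obtain ⟨o, tw⟩ := st; exact ih o tw

-- invariant proof for B's loop: the two sets are exactly the edges seen once / twice so far
theorem pvRun_spec (E p : List (Int × Int)) (once twice : PySem.Set (Int × Int))
    (h1 : ∀ e, e ∈ once ↔ p.count e = 1)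
    (h2 : ∀ e, e ∈ twice ↔ p.count e = 2)
    (h3 : ∀ e, p.count e ≤ 2) :
    (pvRun E once twice = true ↔ ∀ x, (p ++ E).count x ≤ 2) := by
  induction E generalizing p once twice with
  | nil => simpa [pvRun] using h3
  | cons e es ih =>
    have hcnt : ∀ x : Int × Int, (p ++ [e]).count x = p.count x + (if x = e then 1 else 0) := by
      intro x
      rw [List.count_append]
      by_cases hx : x = e
      · subst hx; simp
      · have hex : ¬ e = x := fun h => hx h.symm
        simp [hex, hx]
    simp only [pvRun, pvStep]
    by_cases ht : e ∈ twice
    · have hc2 : p.count e = 2 := (h2 e).mp ht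
      have hct : PySem.Set.contains twice e = true := (PySem.Set.contains_iff twice e).mpr ht
      simp only [hct, if_true, Bool.false_eq_true, false_iff, not_forall]
      refine ⟨e, ?_⟩
      have : (p ++ e :: es).count e = p.count e + (e :: es).count e := List.count_append ..
      have h4 : (e :: es).count e = es.count e + 1 := List.count_cons_self ..
      omega
    · have hct : PySem.Set.contains twice e = false := by
        simp [ht]
      rw [hct]
      simp only [Bool.false_eq_true, if_false]
      by_cases ho : e ∈ once
      · have hc1 : p.count e = 1 := (h1 e).mp ho
        have hco : PySem.Set.contains once e = true := (PySem.Set.contains_iff once e).mpr ho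
        rw [hco]
        simp only [if_true]
        have key := ih (p ++ [e]) (PySem.Set.discard once e) (PySem.Set.add twice e)
          (by
            intro x
            rw [PySem.Set.mem_discard, hcnt x, h1 x]
            by_cases hx : x = e
            · subst hx; simp [hc1]
            · simp [hx])
          (by
            intro x
            rw [PySem.Set.mem_add, hcnt x, h2 x]
            by_cases hx : x = e
            · subst hx; simp [hc1]
            · simp [hx])
          (by
            intro x
            rw [hcnt x]
            have := h3 x
            by_cases hx : x = e
            · subst hx; rw [if_pos rfl]; omega
            · simp [hx]; omega)
        rw [List.append_assoc, List.singleton_append] at key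
        exact key
      · have hc0 : p.count e = 0 := by
          have := h3 e
          have n1 : p.count e ≠ 1 := fun h => ho ((h1 e).mpr h)
          have n2 : p.count e ≠ 2 := fun h => ht ((h2 e).mpr h)
          omega
        have hco : PySem.Set.contains once e = false := by
          simp [ho]
        rw [hco]
        simp only [Bool.false_eq_true, if_false]
        have key := ih (p ++ [e]) (PySem.Set.add once e) twice
          (by
            intro x
            rw [PySem.Set.mem_add, hcnt x, h1 x]
            by_cases hx : x = e
            · subst hx; simp [hc0]
            · simp [hx])
          (by
            intro x
            rw [hcnt x, h2 x]
            by_cases hx : x = e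
            · subst hx; simp [hc0]
            · simp [hx])
          (by
            intro x
            rw [hcnt x]
            have := h3 x
            by_cases hx : x = e
            · subst hx; rw [if_pos rfl]; omega
            · simp [hx]; omega)
        rw [List.append_assoc, List.singleton_append] at key
        exact key

theorem alt_iff (ts : List (Int × Int × Int)) :
    (check_manifold_property_py_alt ts = true ↔ ∀ x, (ts.flatMap pvEdges).count x ≤ 2) := by
  unfold check_manifold_property_py_alt
  rw [pvTriLoop_eq_pvRun]
  have := pvRun_spec (ts.flatMap pvEdges) [] PySem.Set.empty PySem.Set.empty
    (by intro e; simp [PySem.Set.empty]) (by intro e; simp [PySem.Set.empty]) (by intro e; simp)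
  simpa using this

-- the counting generator: foldl adds one per value > 2
theorem foldl_count_gt (vs : List Int) (acc : Int) :
    vs.foldl (fun acc c => if 2 < c then acc + 1 else acc) acc
      = acc + ((vs.filter (fun c => 2 < c)).length : Int) := by
  induction vs generalizing acc with
  | nil => simp
  | cons v vs ih =>
    simp only [List.foldl_cons, List.filter_cons]
    by_cases h : (2:Int) < v
    · simp [h, ih]; ring
    · simp [h, ih]

theorem a_iff (ts : List (Int × Int × Int)) :
    (check_manifold_property_py ts = true ↔ ∀ x, (ts.flatMap pvEdges).count x ≤ 2) := by
  unfold check_manifold_property_py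
  rw [show (fun (d : PySem.Dict (Int × Int) Int) (t : Int × Int × Int) =>
        (let edges := [pvSorted2 t.1 t.2.1, pvSorted2 t.2.1 t.2.2, pvSorted2 t.2.2 t.1]
         edges.foldl (fun d e => d.insert e (d.getD e 0 + 1)) d))
      = (fun d t => (pvEdges t).foldl (fun d e => d.insert e (d.getD e 0 + 1)) d) from rfl]
  rw [← List.foldl_flatMap, PySem.Dict.foldl_insert_getD_add_one_eq_counter]
  simp only [PySem.Dict.values, PySem.Dict.items_counter, List.map_map, Function.comp,
    foldl_count_gt, zero_add, beq_iff_eq, Int.natCast_eq_zero, List.length_eq_zero_iff,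
    List.filter_eq_nil_iff, List.mem_map, decide_eq_true_eq, not_lt]
  constructor
  · intro h x
    by_cases hx : x ∈ ts.flatMap pvEdges
    · have hmem : x ∈ PySem.Set.ofList (ts.flatMap pvEdges) := by
        rw [PySem.Set.mem_ofList]; exact hx
      have := h _ ⟨x, hmem, rfl⟩
      exact_mod_cast this
    · simp [List.count_eq_zero_of_not_mem hx]
  · intro h c hc
    obtain ⟨k, _, rfl⟩ := hc
    exact_mod_cast h k

-- ===== VERDICT (by name: the statement is the Claim_ definition above) =====
theorem check_manifold_property_py_spec : Claim_equal_check_manifold_property_py := by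
  intro ts _
  unfold Spec_check_manifold_property_py
  exact Bool.coe_iff_coe.mp ((a_iff ts).trans (alt_iff ts).symm)
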